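-- pv_equiv track=rewrite | github.com/PoGorzalke/pypwMP2023 | example.py | swap_max
-- ===== SOURCE A (Python) =====
-- def swap_max(items: list) -> list:
--     max_pos = 0
--     for i in range(len(items)):
--         if items[i] >= items[max_pos]:
--             max_pos = i
--     tmp = items[0]
--     items[0] = items[max_pos]
--     items[max_pos] = tmp
--     #items[0], items[max_pos] = items[max_pos], items[0]
--     return items
-- ===== SOURCE B (Python) =====
-- def swap_max(items: list) -> list:
--     def last_argmax(lo, hi):
--         # divide and conquer: position of the last maximum in items[lo:hi]
--         if hi - lo <= 1:
--             return lo
--         mid = (lo + hi) // 2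
--         l = last_argmax(lo, mid)
--         r = last_argmax(mid, hi)
--         return l if items[l] > items[r] else r
--     p = last_argmax(0, len(items))
--     items[0], items[p] = items[p], items[0]
--     return items
-- ===== Notes on version B (the rewrite author's own statement) =====
-- stated objective: alternative
-- what changed: Replaces A's forward running-argmax scan with a divide-and-conquer recursion that finds the last position of the maximum by halving the index range (ties resolved to the right half), then swaps it with the front.
import Mathlib
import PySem

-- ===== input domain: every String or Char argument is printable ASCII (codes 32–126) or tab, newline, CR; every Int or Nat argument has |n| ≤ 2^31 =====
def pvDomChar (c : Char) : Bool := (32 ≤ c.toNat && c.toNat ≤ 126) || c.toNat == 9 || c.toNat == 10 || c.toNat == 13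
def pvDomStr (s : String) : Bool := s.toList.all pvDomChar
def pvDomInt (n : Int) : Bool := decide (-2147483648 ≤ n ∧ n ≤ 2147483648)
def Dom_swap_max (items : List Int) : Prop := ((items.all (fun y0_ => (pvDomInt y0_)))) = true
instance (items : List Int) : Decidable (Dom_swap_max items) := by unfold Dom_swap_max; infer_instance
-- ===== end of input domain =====

-- B finds the last position of the maximum by divide-and-conquer over the index range (ties go to
-- the right half) instead of A's forward running-argmax scan, then swaps it with the front; both
-- Pythons mutate `items` in place — the equivalence proved here is about the return value.

-- ===== PORT A =====
def swap_max (items : List Int) : List Int :=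
  let max_pos : Int :=
    (PySem.List.pyRange 0 (items.length : Int) 1).foldl
      (fun mp i =>
        if PySem.List.pyGetD items mp 0 ≤ PySem.List.pyGetD items i 0 then i else mp) 0
  let tmp := PySem.List.pyGetD items 0 0
  let items1 := PySem.List.pySetD items 0 (PySem.List.pyGetD items max_pos 0)
  PySem.List.pySetD items1 max_pos tmp

-- ===== PORT B =====
-- helper `last_argmax(lo, hi)` of Source B: divide and conquer on the index range
def lastArgmaxDC (items : List Int) (lo hi : Nat) : Nat :=
  if hi - lo ≤ 1 then lo
  else
    let mid := (lo + hi) / 2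
    let l := lastArgmaxDC items lo mid
    let r := lastArgmaxDC items mid hi
    if PySem.List.pyGetD items (r : Int) 0 < PySem.List.pyGetD items (l : Int) 0 then l else r
termination_by hi - lo
decreasing_by all_goals omega

def swap_max_alt (items : List Int) : List Int :=
  let p : Nat := lastArgmaxDC items 0 items.length
  -- items[0], items[p] = items[p], items[0]  (right-hand side read first, then the two writes)
  let a := PySem.List.pyGetD items (p : Int) 0
  let b := PySem.List.pyGetD items 0 0
  let items1 := PySem.List.pySetD items 0 a
  PySem.List.pySetD items1 (p : Int) b

-- ===== PRECONDITION & SPEC =====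
-- Pre_ excludes exactly the empty list, on which both Pythons raise IndexError at the swap.
def Pre_swap_max (items : List Int) : Prop := items ≠ []
instance (items : List Int) : Decidable (Pre_swap_max items) := by unfold Pre_swap_max; infer_instance
def pvWitness_swap_max : List Int := [1, 3, 2, 3]
def Spec_swap_max (items : List Int) (out : List Int) : Prop := out = swap_max_alt items
instance (items : List Int) (out : List Int) : Decidable (Spec_swap_max items out) := by unfold Spec_swap_max; infer_instance

-- ===== CLAIM (what is proved, stated in full; the proofs are below) =====
def Claim_equal_swap_max : Prop := ∀ (items : List Int), Dom_swap_max items → Pre_swap_max items → Spec_swap_max items (swap_max items)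

-- ===== LEMMAS AND PROOFS =====

-- "r is the position of the last maximum among indices lo ≤ j < hi"
def LastArgmaxI (items : List Int) (lo hi r : Nat) : Prop :=
  lo ≤ r ∧ r < hi ∧ (∀ j, lo ≤ j → j < hi → items.getD j 0 ≤ items.getD r 0) ∧
    (∀ j, r < j → j < hi → items.getD j 0 < items.getD r 0)

theorem lastArgmaxI_unique (items : List Int) (lo hi r r' : Nat)
    (h : LastArgmaxI items lo hi r) (h' : LastArgmaxI items lo hi r') : r = r' := by
  obtain ⟨hlo, hr, hmax, hstr⟩ := h
  obtain ⟨hlo', hr', hmax', hstr'⟩ := h'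
  rcases lt_trichotomy r r' with hlt | heq | hgt
  · have h1 := hstr r' hlt hr'
    have h2 := hmax' r hlo hr
    omega
  · exact heq
  · have h1 := hstr' r hgt hr
    have h2 := hmax r' hlo' hr'
    omega

-- A's fold over range(len(items)) computes the last argmax of the whole list
theorem foldA_lastArgmax (items : List Int) (k : Nat) (hk : k ≤ items.length) (hpos : 0 < k) :
    ∃ r : Nat,
      (List.range k).foldl
        (fun mp i =>
          if PySem.List.pyGetD items mp 0 ≤ PySem.List.pyGetD items ((i : Nat) : Int) 0
          then ((i : Nat) : Int) else mp) 0 = (r : Int) ∧ LastArgmaxI items 0 k r := by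
  induction k with
  | zero => omega
  | succ k ih =>
    rcases Nat.eq_zero_or_pos k with rfl | hkpos
    · refine ⟨0, by simp [List.range_succ], ?_⟩
      refine ⟨le_refl _, Nat.zero_lt_one, fun j _ hj => ?_, fun j h1 h2 => by omega⟩
      have : j = 0 := by omega
      subst this; exact le_refl _
    · obtain ⟨r, hfold, hlo, hr, hmax, hstr⟩ := ih (by omega) hkpos
      rw [List.range_succ, List.foldl_append, hfold]
      simp only [List.foldl_cons, List.foldl_nil, PySem.List.pyGetD_natCast]
      by_cases hle : items.getD r 0 ≤ items.getD k 0
      · refine ⟨k, by rw [if_pos hle], Nat.zero_le _, by omega, fun j _ hj => ?_, fun j h1 h2 => by omega⟩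
        rcases Nat.lt_succ_iff_lt_or_eq.mp hj with hj' | rfl
        · exact (hmax j (Nat.zero_le _) hj').trans hle
        · exact le_refl _
      · refine ⟨r, by rw [if_neg hle], Nat.zero_le _, by omega, fun j _ hj => ?_, fun j h1 h2 => ?_⟩
        · rcases Nat.lt_succ_iff_lt_or_eq.mp hj with hj' | rfl
          · exact hmax j (Nat.zero_le _) hj'
          · omega
        · rcases Nat.lt_succ_iff_lt_or_eq.mp h2 with h2' | rfl
          · exact hstr j h1 h2'
          · omega

theorem swap_max_foldA (items : List Int) :
    (PySem.List.pyRange 0 (items.length : Int) 1).foldl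
      (fun mp i =>
        if PySem.List.pyGetD items mp 0 ≤ PySem.List.pyGetD items i 0 then i else mp) 0 =
    (List.range items.length).foldl
      (fun mp i =>
        if PySem.List.pyGetD items mp 0 ≤ PySem.List.pyGetD items ((i : Nat) : Int) 0
        then ((i : Nat) : Int) else mp) 0 := by
  rw [PySem.List.pyRange_one, List.foldl_map]
  simp

-- B's divide-and-conquer computes the last argmax of items[lo:hi]
theorem dc_lastArgmax (items : List Int) (d lo hi : Nat) (hd : hi - lo ≤ d)
    (hlh : lo < hi) (hhi : hi ≤ items.length) :
    LastArgmaxI items lo hi (lastArgmaxDC items lo hi) := by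
  induction d generalizing lo hi with
  | zero => omega
  | succ d ih =>
    rw [lastArgmaxDC]
    by_cases hbase : hi - lo ≤ 1
    · rw [if_pos hbase]
      have : hi = lo + 1 := by omega
      subst this
      refine ⟨le_refl _, by omega, fun j h1 h2 => ?_, fun j h1 h2 => by omega⟩
      have hjlo : j = lo := by omega
      rw [hjlo]
    · rw [if_neg hbase]
      have hmid1 : lo < (lo + hi) / 2 := by omega
      have hmid2 : (lo + hi) / 2 < hi := by omega
      obtain ⟨hllo, hlr, hlmax, hlstr⟩ := ih lo ((lo + hi) / 2) (by omega) hmid1 (by omega)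
      obtain ⟨hrlo, hrr, hrmax, hrstr⟩ := ih ((lo + hi) / 2) hi (by omega) hmid2 hhi
      simp only [PySem.List.pyGetD_natCast]
      set l := lastArgmaxDC items lo ((lo + hi) / 2) with hl
      set r := lastArgmaxDC items ((lo + hi) / 2) hi with hr
      by_cases hcmp : items.getD r 0 < items.getD l 0
      · rw [if_pos hcmp]
        refine ⟨hllo, by omega, fun j h1 h2 => ?_, fun j h1 h2 => ?_⟩
        · by_cases hj : j < (lo + hi) / 2
          · exact hlmax j h1 hj
          · exact le_of_lt (lt_of_le_of_lt (hrmax j (by omega) h2) hcmp)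
        · by_cases hj : j < (lo + hi) / 2
          · exact hlstr j h1 hj
          · exact lt_of_le_of_lt (hrmax j (by omega) h2) hcmp
      · rw [if_neg hcmp]
        rw [not_lt] at hcmp
        refine ⟨by omega, hrr, fun j h1 h2 => ?_, fun j h1 h2 => ?_⟩
        · by_cases hj : j < (lo + hi) / 2
          · exact (hlmax j h1 hj).trans hcmp
          · exact hrmax j (by omega) h2
        · exact hrstr j (by omega) h2

-- ===== VERDICT (by name: the statement is the Claim_ definition above) =====
theorem swap_max_spec : Claim_equal_swap_max := by
  intro items _ hpre
  unfold Spec_swap_max swap_max swap_max_alt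
  have hpos : 0 < items.length := List.length_pos_iff.mpr hpre
  obtain ⟨rA, hfoldA, hA⟩ := foldA_lastArgmax items items.length (le_refl _) hpos
  have hB := dc_lastArgmax items items.length 0 items.length (by omega) hpos (le_refl _)
  have hrr : rA = lastArgmaxDC items 0 items.length := lastArgmaxI_unique items 0 items.length _ _ hA hB
  simp only [swap_max_foldA, hfoldA, hrr]
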